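-- pv_equiv track=rewrite | github.com/logan676/translate | deep_seek_translate_docx.py | group_into_segments
-- ===== SOURCE A (Python) =====
-- PAGES_PER_SEGMENT = 5
--
-- def group_into_segments(paragraphs_with_page):
--     """
--     Group paragraphs into segments, each containing up to PAGES_PER_SEGMENT pages.
--     Returns a dict: {segment_index: [(page_num, paragraph), ...]}.
--     """
--     segments = {}
--     for page_num, paragraph in paragraphs_with_page:
--         segment_index = ((page_num - 1) // PAGES_PER_SEGMENT) + 1
--         if segment_index not in segments:
--             segments[segment_index] = []
--         segments[segment_index].append((page_num, paragraph))
--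
--     return segments
-- ===== SOURCE B (Python) =====
-- PAGES_PER_SEGMENT = 5
--
--
-- def group_into_segments(paragraphs_with_page):
--     # Two-pass: collect the segment indices in first-occurrence order, then
--     # build each segment's list with one filter pass per segment.
--     order = list(dict.fromkeys(
--         ((page_num - 1) // PAGES_PER_SEGMENT) + 1
--         for page_num, _ in paragraphs_with_page))
--     return {
--         k: [(p, t) for p, t in paragraphs_with_page
--             if ((p - 1) // PAGES_PER_SEGMENT) + 1 == k]
--         for k in order
--     }
-- ===== Notes on version B (the rewrite author's own statement) =====
-- stated objective: alternative
-- what changed: Replaces the incremental dict-building loop by a two-pass scheme: first an ordered dedup of the segment indices, then a dict comprehension that builds each segment's list with a filter pass over the input.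
import Mathlib
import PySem

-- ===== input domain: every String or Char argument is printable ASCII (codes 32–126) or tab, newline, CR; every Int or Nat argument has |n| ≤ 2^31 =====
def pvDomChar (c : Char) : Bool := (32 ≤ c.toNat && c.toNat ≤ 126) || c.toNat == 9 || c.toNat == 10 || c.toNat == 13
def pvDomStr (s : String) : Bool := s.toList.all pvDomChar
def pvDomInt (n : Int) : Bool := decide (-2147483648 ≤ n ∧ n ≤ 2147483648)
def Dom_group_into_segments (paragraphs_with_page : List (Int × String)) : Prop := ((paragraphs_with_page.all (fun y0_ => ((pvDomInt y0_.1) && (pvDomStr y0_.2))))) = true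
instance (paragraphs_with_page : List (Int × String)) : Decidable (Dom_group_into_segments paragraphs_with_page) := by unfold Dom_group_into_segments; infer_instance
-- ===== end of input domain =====

-- B replaces A's incremental dict-building loop by an ordered dedup of the segment
-- indices followed by one filter pass per segment (objective: alternative decomposition).

-- ===== PORT A =====
-- Faithful port of A: fold the dict-building loop over the input, return the dict's items.
def group_into_segments (paragraphs_with_page : List (Int × String)) : List (Int × List (Int × String)) :=
  (paragraphs_with_page.foldl
    (fun segments q =>
      let segment_index := PySem.Int.floordiv (q.1 - 1) 5 + 1
      let segments :=
        if segments.contains segment_index then segments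
        else segments.insert segment_index []
      segments.modify segment_index [] (fun l => l ++ [q]))
    PySem.Dict.empty).items

-- ===== PORT B =====
-- Port of B: ordered dedup of segment indices (dict.fromkeys), then one filter pass per segment.
def segIdx (p : Int) : Int := PySem.Int.floordiv (p - 1) 5 + 1

def group_into_segments_alt (paragraphs_with_page : List (Int × String)) : List (Int × List (Int × String)) :=
  (PySem.List.dedup (paragraphs_with_page.map (fun q => segIdx q.1))).map
    (fun k => (k, paragraphs_with_page.filter (fun q => segIdx q.1 == k)))

-- ===== PRECONDITION & SPEC =====
def Spec_group_into_segments (paragraphs_with_page : List (Int × String)) (out : List (Int × List (Int × String))) : Prop := out = group_into_segments_alt paragraphs_with_page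
instance (paragraphs_with_page : List (Int × String)) (out : List (Int × List (Int × String))) : Decidable (Spec_group_into_segments paragraphs_with_page out) := by unfold Spec_group_into_segments; infer_instance

-- ===== CLAIM (what is proved, stated in full; the proofs are below) =====
def Claim_equal_group_into_segments : Prop := ∀ (paragraphs_with_page : List (Int × String)), Dom_group_into_segments paragraphs_with_page → Spec_group_into_segments paragraphs_with_page (group_into_segments paragraphs_with_page)

-- ===== LEMMAS AND PROOFS =====

-- A's loop body, named for the proofs (definitionally equal to the lambda in the port of A).
def stepA (d : PySem.Dict Int (List (Int × String))) (q : Int × String) : PySem.Dict Int (List (Int × String)) :=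
  let segment_index := PySem.Int.floordiv (q.1 - 1) 5 + 1
  let d := if d.contains segment_index then d else d.insert segment_index []
  d.modify segment_index [] (fun l => l ++ [q])

lemma stepA_eq (d : PySem.Dict Int (List (Int × String))) (q : Int × String) :
    stepA d q = if d.contains (segIdx q.1) then d.insert (segIdx q.1) (d.getD (segIdx q.1) [] ++ [q])
                else d.insert (segIdx q.1) [q] := by
  show (if d.contains (segIdx q.1) then d else d.insert (segIdx q.1) []).modify (segIdx q.1) [] (fun l => l ++ [q]) = _
  by_cases hc : d.contains (segIdx q.1)
  · simp [hc, PySem.Dict.modify]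
  · simp only [hc, if_false, Bool.false_eq_true, PySem.Dict.modify,
      PySem.Dict.getD_insert_self, PySem.Dict.insert_insert_self, List.nil_append]

-- Invariant of A's loop: the dict's items are exactly B's dedup-then-filter result.
lemma loop_items (xs : List (Int × String)) :
    (xs.foldl stepA PySem.Dict.empty).items
    = (PySem.List.dedup (xs.map (fun q => segIdx q.1))).map
        (fun k => (k, xs.filter (fun q => segIdx q.1 == k))) := by
  induction xs using List.reverseRecOn with
  | nil => rfl
  | append_singleton xs q ih =>
    rw [List.foldl_append, List.foldl_cons, List.foldl_nil, stepA_eq]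
    generalize hd : xs.foldl stepA PySem.Dict.empty = d at ih ⊢
    have hkeys : d.keys = PySem.List.dedup (xs.map (fun q => segIdx q.1)) := by
      show d.items.map (·.1) = _
      rw [ih, List.map_map]; simp [Function.comp_def]
    have hnd : d.keys.Nodup := by rw [hkeys]; exact PySem.Set.nodup_ofList _
    have hdedup : PySem.List.dedup ((xs ++ [q]).map (fun q => segIdx q.1))
        = PySem.Set.add (PySem.List.dedup (xs.map (fun q => segIdx q.1))) (segIdx q.1) := by
      simp [PySem.List.dedup, PySem.Set.ofList_append, PySem.Set.update_cons, PySem.Set.update_nil]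
    have hmem : d.contains (segIdx q.1) = true ↔ segIdx q.1 ∈ PySem.List.dedup (xs.map (fun q => segIdx q.1)) := by
      rw [PySem.Dict.contains_iff_mem_keys, hkeys]
    by_cases hc : d.contains (segIdx q.1)
    · have hkmem := hmem.mp hc
      have hgetD : d.getD (segIdx q.1) [] = xs.filter (fun q' => segIdx q'.1 == segIdx q.1) := by
        refine PySem.Dict.getD_of_mem_items d ?_ hnd []
        rw [ih]; exact List.mem_map_of_mem hkmem
      rw [if_pos hc, hgetD, PySem.Dict.items_insert_of_contains _ _ hc, ih, hdedup, List.map_map]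
      have hadd : PySem.Set.add (PySem.List.dedup (xs.map (fun q => segIdx q.1))) (segIdx q.1)
          = PySem.List.dedup (xs.map (fun q => segIdx q.1)) := by
        have : PySem.Set.contains (PySem.List.dedup (xs.map (fun q => segIdx q.1))) (segIdx q.1) = true := by
          simpa [PySem.Set.contains] using hkmem
        simp only [PySem.Set.add, this, if_true]
      rw [hadd]
      apply List.map_congr_left
      intro k' _
      by_cases hkk : k' = segIdx q.1
      · subst hkk; simp [List.filter_append]
      · have hne2 : (segIdx q.1 == k') = false := by simp [Ne.symm hkk]
        simp [List.filter_append, hne2, hkk]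
    · have hnmem : segIdx q.1 ∉ PySem.List.dedup (xs.map (fun q => segIdx q.1)) := fun h => hc (hmem.mpr h)
      have hnoseg : ∀ a ∈ xs, segIdx a.1 ≠ segIdx q.1 := by
        intro a ha h
        exact hnmem (h ▸ (PySem.Set.mem_ofList _ _).mpr (List.mem_map_of_mem ha))
      have hfilter : xs.filter (fun q' => segIdx q'.1 == segIdx q.1) = [] := by
        rw [List.filter_eq_nil_iff]
        intro a ha
        simpa using hnoseg a ha
      have hcf : d.contains (segIdx q.1) = false := by simpa using hc
      rw [if_neg hc, PySem.Dict.items_insert_of_not_contains _ _ hcf, ih, hdedup]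
      have hadd : PySem.Set.add (PySem.List.dedup (xs.map (fun q => segIdx q.1))) (segIdx q.1)
          = PySem.List.dedup (xs.map (fun q => segIdx q.1)) ++ [segIdx q.1] := by
        have : PySem.Set.contains (PySem.List.dedup (xs.map (fun q => segIdx q.1))) (segIdx q.1) = false := by
          simpa [PySem.Set.contains] using hnmem
        simp only [PySem.Set.add, this, Bool.false_eq_true, if_false]
      rw [hadd, List.map_append]
      congr 1
      · apply List.map_congr_left
        intro k' hk'
        have hkk : k' ≠ segIdx q.1 := fun h => hnmem (h ▸ hk')
        have hne : (segIdx q.1 == k') = false := by simp [Ne.symm hkk]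
        simp [List.filter_append, hne]
      · simp only [List.map_cons, List.map_nil, List.filter_append, hfilter, List.nil_append]
        simp

lemma main_items (xs : List (Int × String)) :
    group_into_segments xs = group_into_segments_alt xs := by
  show (xs.foldl stepA PySem.Dict.empty).items = _
  rw [loop_items]
  rfl

-- ===== VERDICT (by name: the statement is the Claim_ definition above) =====
theorem group_into_segments_spec : Claim_equal_group_into_segments := by
  intro xs _
  unfold Spec_group_into_segments
  exact main_items xs
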